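-- pv_equiv track=rewrite | github.com/Akhan521/Interview-Prep | CodePath TIP-102/Unit 3/Day 1/extra_treats.py | predict_adoption_victory
-- ===== SOURCE A (Python) =====
-- from collections import deque
--
-- def predict_adoption_victory(votes):
--     # Initialize queues for both groups; we'll use 2 queues to simulate voting queues/lines for each group.
--     cat_queue = deque()
--     dog_queue = deque()
--
--     for i, vote in enumerate(votes):
--         # Add the position of each volunteer to their respective queue.
--         if vote == 'C':
--             cat_queue.append(i)
--         else:
--             dog_queue.append(i)
--
--     # Process the voting rounds until one group is completely banned.
--     while cat_queue and dog_queue: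
--         # Get the front volunteer from each group.
--         cat_index = cat_queue.popleft()
--         dog_index = dog_queue.popleft()
--
--         # The volunteer with the smaller index bans the other.
--         if cat_index < dog_index:
--             # The Cat Lover bans the Dog Lover; the Cat Lover gets to vote again in the next round.
--             cat_queue.append(cat_index + len(votes))
--         else:
--             # The Dog Lover bans the Cat Lover; the Dog Lover gets to vote again in the next round.
--             dog_queue.append(dog_index + len(votes))
--
--     # Determine which group has remaining volunteers.
--     return "Cat Lovers" if cat_queue else "Dog Lovers"
-- ===== SOURCE B (Python) =====
-- def predict_adoption_victory(votes):
--     # Single scheduling queue of sides (True = cat), earliest first: the front voter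
--     # bans the earliest opposing voter and re-queues at the back.
--     s = [v == 'C' for v in votes]
--     while any(s):
--         if all(s):
--             return "Cat Lovers"
--         x = s.pop(0)
--         s.remove(not x)
--         s.append(x)
--     return "Dog Lovers"
-- ===== Notes on version B (the rewrite author's own statement) =====
-- stated objective: alternative
-- what changed: Replaces A's two index queues (re-queue with index+n, compare fronts) by a single scheduling list of sides in which the front voter removes the earliest opposing voter and re-queues at the back, with no indices at all.
import Mathlib
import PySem

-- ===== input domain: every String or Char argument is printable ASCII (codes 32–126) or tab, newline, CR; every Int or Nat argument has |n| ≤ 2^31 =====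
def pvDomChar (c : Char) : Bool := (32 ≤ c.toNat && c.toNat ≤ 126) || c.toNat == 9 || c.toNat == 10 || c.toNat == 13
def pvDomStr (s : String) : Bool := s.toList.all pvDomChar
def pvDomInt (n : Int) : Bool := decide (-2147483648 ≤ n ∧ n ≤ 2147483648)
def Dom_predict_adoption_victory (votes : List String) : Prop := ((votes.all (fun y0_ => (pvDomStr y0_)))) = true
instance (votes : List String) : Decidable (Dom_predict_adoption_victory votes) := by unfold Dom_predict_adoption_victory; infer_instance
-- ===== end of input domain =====

-- B replaces A's two index queues by one scheduling list of sides (front voter bans the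
-- earliest opposing voter and re-queues at the back); objective: alternative decomposition.

-- ===== PORT A =====
-- the while loop of A: pop both fronts, smaller index bans the other and re-queues with +n
def pvGoA (n : Int) (catQ dogQ : List Int) : String :=
  match catQ, dogQ with
  | c :: cs, d :: ds =>
      if c < d then pvGoA n (cs ++ [c + n]) ds
      else pvGoA n cs (ds ++ [d + n])
  | [], _ => "Dog Lovers"
  | _, [] => "Cat Lovers"
termination_by catQ.length + dogQ.length
decreasing_by all_goals (simp; try omega)

def predict_adoption_victory (votes : List String) : String :=
  let qs := (PySem.List.enumerate votes 0).foldl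
      (fun (q : List Int × List Int) iv =>
        if iv.2 == "C" then (q.1 ++ [iv.1], q.2) else (q.1, q.2 ++ [iv.1]))
      ([], [])
  pvGoA (votes.length : Int) qs.1 qs.2

-- ===== PORT B =====
-- the while loop of B: s is the scheduling list (true = cat); the front voter removes the
-- first opposing voter and is re-appended
def pvGoB (s : List Bool) : String :=
  if h1 : true ∈ s then
    if h2 : false ∈ s then
      match s with
      | x :: rest => pvGoB (rest.erase (!x) ++ [x])
      | [] => "Dog Lovers"   -- unreachable: h1 forces s ≠ []
    else "Cat Lovers"
  else "Dog Lovers"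
termination_by s.length
decreasing_by
  have hx : (!x) ∈ rest := by
    cases x <;> simp_all
  have h0 : rest.length ≠ 0 := by rintro h; rw [List.length_eq_zero_iff] at h; subst h; simp at hx
  simp [List.length_erase_of_mem hx]
  try omega

def predict_adoption_victory_alt (votes : List String) : String :=
  pvGoB (votes.map (fun v => v == "C"))

-- ===== PRECONDITION & SPEC =====
def Spec_predict_adoption_victory (votes : List String) (out : String) : Prop := out = predict_adoption_victory_alt votes
instance (votes : List String) (out : String) : Decidable (Spec_predict_adoption_victory votes out) := by unfold Spec_predict_adoption_victory; infer_instance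

-- ===== CLAIM (what is proved, stated in full; the proofs are below) =====
def Claim_equal_predict_adoption_victory : Prop := ∀ (votes : List String), Dom_predict_adoption_victory votes → Spec_predict_adoption_victory votes (predict_adoption_victory votes)

-- ===== LEMMAS AND PROOFS =====

-- indices of the cat / dog voters, starting at offset k
def catIdx (k : Int) : List String → List Int
  | [] => []
  | v :: vs => if v == "C" then k :: catIdx (k + 1) vs else catIdx (k + 1) vs

def dogIdx (k : Int) : List String → List Int
  | [] => []
  | v :: vs => if v == "C" then dogIdx (k + 1) vs else k :: dogIdx (k + 1) vs

-- merge two (sorted) index queues by value into the scheduling order of sides; ties go to the dog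
def pvMerge : List Int → List Int → List Bool
  | [], ds => ds.map (fun _ => false)
  | cs, [] => cs.map (fun _ => true)
  | c :: cs, d :: ds => if c < d then true :: pvMerge cs (d :: ds) else false :: pvMerge (c :: cs) ds
termination_by cs ds => cs.length + ds.length

lemma pvMerge_nil_right (cs : List Int) : pvMerge cs [] = cs.map (fun _ => true) := by
  cases cs <;> simp [pvMerge]

lemma mem_true_pvMerge (cs ds : List Int) : true ∈ pvMerge cs ds ↔ cs ≠ [] := by
  induction cs, ds using pvMerge.induct with
  | case1 ds => simp [pvMerge]
  | case2 cs h => cases cs <;> simp_all [pvMerge]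
  | case3 c cs d ds hlt ih =>
    rw [show pvMerge (c :: cs) (d :: ds) = true :: pvMerge cs (d :: ds) from by simp [pvMerge, hlt]]
    simp_all
  | case4 c cs d ds hlt ih =>
    rw [show pvMerge (c :: cs) (d :: ds) = false :: pvMerge (c :: cs) ds from by simp [pvMerge, hlt]]
    simp_all

lemma mem_false_pvMerge (cs ds : List Int) : false ∈ pvMerge cs ds ↔ ds ≠ [] := by
  induction cs, ds using pvMerge.induct with
  | case1 ds => cases ds <;> simp_all [pvMerge]
  | case2 cs h => cases cs <;> simp_all [pvMerge]
  | case3 c cs d ds hlt ih =>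
    rw [show pvMerge (c :: cs) (d :: ds) = true :: pvMerge cs (d :: ds) from by simp [pvMerge, hlt]]
    simp_all
  | case4 c cs d ds hlt ih =>
    rw [show pvMerge (c :: cs) (d :: ds) = false :: pvMerge (c :: cs) ds from by simp [pvMerge, hlt]]
    simp_all

lemma pvMerge_cons_left (c : Int) (cs ds : List Int) (h : ∀ e ∈ ds, c < e) :
    pvMerge (c :: cs) ds = true :: pvMerge cs ds := by
  cases ds with
  | nil => simp [pvMerge_nil_right]
  | cons d ds =>
    have : c < d := h d (by simp)
    simp [pvMerge, this]

lemma pvMerge_cons_right (cs : List Int) (d : Int) (ds : List Int) (h : ∀ e ∈ cs, d < e) :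
    pvMerge cs (d :: ds) = false :: pvMerge cs ds := by
  cases cs with
  | nil => simp [pvMerge]
  | cons c cs =>
    have : ¬ c < d := by have := h c (by simp); omega
    simp [pvMerge, this]

lemma erase_false_pvMerge (cs : List Int) (d : Int) (ds : List Int) (h : ∀ e ∈ ds, d < e) :
    (pvMerge cs (d :: ds)).erase false = pvMerge cs ds := by
  induction cs with
  | nil => simp [pvMerge]
  | cons c cs ih =>
    by_cases hlt : c < d
    · rw [show pvMerge (c :: cs) (d :: ds) = true :: pvMerge cs (d :: ds) from by simp [pvMerge, hlt]]
      rw [List.erase_cons_tail (by simp), ih]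
      rw [pvMerge_cons_left c cs ds (fun e he => lt_trans hlt (h e he))]
    · rw [show pvMerge (c :: cs) (d :: ds) = false :: pvMerge (c :: cs) ds from by simp [pvMerge, hlt]]
      rw [List.erase_cons_head]

lemma erase_true_pvMerge (c : Int) (cs ds : List Int) (h : ∀ e ∈ cs, c < e) :
    (pvMerge (c :: cs) ds).erase true = pvMerge cs ds := by
  induction ds with
  | nil =>
    rw [show pvMerge (c :: cs) [] = true :: cs.map (fun _ => true) from by simp [pvMerge_nil_right]]
    rw [List.erase_cons_head]
    simp [pvMerge_nil_right]
  | cons d ds ih =>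
    by_cases hlt : c < d
    · rw [show pvMerge (c :: cs) (d :: ds) = true :: pvMerge cs (d :: ds) from by simp [pvMerge, hlt]]
      rw [List.erase_cons_head]
    · rw [show pvMerge (c :: cs) (d :: ds) = false :: pvMerge (c :: cs) ds from by simp [pvMerge, hlt]]
      rw [List.erase_cons_tail (by simp), ih]
      rw [pvMerge_cons_right cs d ds (fun e he => lt_of_le_of_lt (by omega : d ≤ c) (h e he))]

lemma pvMerge_nil_left (ds : List Int) : pvMerge [] ds = ds.map (fun _ => false) := by
  cases ds <;> simp [pvMerge]

lemma pvMerge_single_left (ds : List Int) (m : Int) (h : ∀ e ∈ ds, e < m) :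
    pvMerge [m] ds = ds.map (fun _ => false) ++ [true] := by
  induction ds with
  | nil => simp [pvMerge_nil_right]
  | cons d ds ih =>
    have hnd : ¬ m < d := by have := h d (by simp); omega
    rw [show pvMerge [m] (d :: ds) = false :: pvMerge [m] ds from by simp [pvMerge, hnd]]
    rw [ih (fun e he => h e (by simp [he]))]
    rfl

lemma pvMerge_single_right (cs : List Int) (m : Int) (h : ∀ e ∈ cs, e < m) :
    pvMerge cs [m] = cs.map (fun _ => true) ++ [false] := by
  induction cs with
  | nil => simp [pvMerge_nil_left]
  | cons c cs ih =>
    have hc : c < m := h c (by simp)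
    rw [show pvMerge (c :: cs) [m] = true :: pvMerge cs [m] from by simp [pvMerge, hc]]
    rw [ih (fun e he => h e (by simp [he]))]
    rfl

lemma append_left_pvMerge (cs ds : List Int) (m : Int) :
    (∀ e ∈ cs, e < m) → (∀ e ∈ ds, e < m) → pvMerge (cs ++ [m]) ds = pvMerge cs ds ++ [true] := by
  induction cs, ds using pvMerge.induct with
  | case1 ds =>
    intro _ h2
    rw [List.nil_append, pvMerge_single_left ds m h2, pvMerge_nil_left]
  | case2 cs h =>
    intro h1 _
    simp [pvMerge_nil_right]
  | case3 c cs d ds hlt ih =>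
    intro h1 h2
    rw [List.cons_append, show pvMerge (c :: (cs ++ [m])) (d :: ds) = true :: pvMerge (cs ++ [m]) (d :: ds) from by
      simp [pvMerge, hlt]]
    rw [ih (fun e he => h1 e (by simp [he])) h2]
    rw [show pvMerge (c :: cs) (d :: ds) = true :: pvMerge cs (d :: ds) from by simp [pvMerge, hlt]]
    rfl
  | case4 c cs d ds hlt ih =>
    intro h1 h2
    rw [show pvMerge ((c :: cs) ++ [m]) (d :: ds) = false :: pvMerge ((c :: cs) ++ [m]) ds from by
      simp [pvMerge, hlt]]
    rw [ih h1 (fun e he => h2 e (by simp [he]))]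
    rw [show pvMerge (c :: cs) (d :: ds) = false :: pvMerge (c :: cs) ds from by simp [pvMerge, hlt]]
    rfl

lemma append_right_pvMerge (cs ds : List Int) (m : Int) :
    (∀ e ∈ cs, e < m) → (∀ e ∈ ds, e < m) → pvMerge cs (ds ++ [m]) = pvMerge cs ds ++ [false] := by
  induction cs, ds using pvMerge.induct with
  | case1 ds =>
    intro _ _
    simp [pvMerge_nil_left]
  | case2 cs h =>
    intro h1 _
    rw [List.nil_append, pvMerge_single_right cs m h1, pvMerge_nil_right]
  | case3 c cs d ds hlt ih =>
    intro h1 h2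
    rw [show pvMerge (c :: cs) ((d :: ds) ++ [m]) = true :: pvMerge cs ((d :: ds) ++ [m]) from by
      simp [pvMerge, hlt]]
    rw [ih (fun e he => h1 e (by simp [he])) h2]
    rw [show pvMerge (c :: cs) (d :: ds) = true :: pvMerge cs (d :: ds) from by simp [pvMerge, hlt]]
    rfl
  | case4 c cs d ds hlt ih =>
    intro h1 h2
    rw [List.cons_append, show pvMerge (c :: cs) (d :: (ds ++ [m])) = false :: pvMerge (c :: cs) (ds ++ [m]) from by
      simp [pvMerge, hlt]]
    rw [ih h1 (fun e he => h2 e (by simp [he]))]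
    rw [show pvMerge (c :: cs) (d :: ds) = false :: pvMerge (c :: cs) ds from by simp [pvMerge, hlt]]
    rfl

lemma mem_catIdx (vs : List String) (k : Int) : ∀ e ∈ catIdx k vs, k ≤ e ∧ e < k + vs.length := by
  induction vs generalizing k with
  | nil => simp [catIdx]
  | cons v vs ih =>
    intro e he
    simp only [catIdx] at he
    by_cases hv : (v == "C") = true
    · rw [if_pos hv] at he
      rw [List.mem_cons] at he
      rcases he with rfl | he
      · simp only [List.length_cons]
        push_cast
        constructor <;> omega
      · have := ih (k + 1) e he
        simp only [List.length_cons]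
        push_cast
        omega
    · rw [if_neg hv] at he
      have := ih (k + 1) e he
      simp only [List.length_cons]
      push_cast
      omega

lemma mem_dogIdx (vs : List String) (k : Int) : ∀ e ∈ dogIdx k vs, k ≤ e ∧ e < k + vs.length := by
  induction vs generalizing k with
  | nil => simp [dogIdx]
  | cons v vs ih =>
    intro e he
    simp only [dogIdx] at he
    by_cases hv : (v == "C") = true
    · rw [if_pos hv] at he
      have := ih (k + 1) e he
      simp only [List.length_cons]
      push_cast
      omega
    · rw [if_neg hv] at he
      rw [List.mem_cons] at he
      rcases he with rfl | he
      · simp only [List.length_cons]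
        push_cast
        constructor <;> omega
      · have := ih (k + 1) e he
        simp only [List.length_cons]
        push_cast
        omega

lemma sorted_catIdx (vs : List String) (k : Int) : (catIdx k vs).Pairwise (· < ·) := by
  induction vs generalizing k with
  | nil => simp [catIdx]
  | cons v vs ih =>
    simp only [catIdx]
    by_cases hv : (v == "C") = true
    · rw [if_pos hv]
      exact List.pairwise_cons.mpr ⟨fun e he => by have := (mem_catIdx vs (k + 1) e he).1; omega, ih (k + 1)⟩
    · rw [if_neg hv]
      exact ih (k + 1)

lemma sorted_dogIdx (vs : List String) (k : Int) : (dogIdx k vs).Pairwise (· < ·) := by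
  induction vs generalizing k with
  | nil => simp [dogIdx]
  | cons v vs ih =>
    simp only [dogIdx]
    by_cases hv : (v == "C") = true
    · rw [if_pos hv]
      exact ih (k + 1)
    · rw [if_neg hv]
      exact List.pairwise_cons.mpr ⟨fun e he => by have := (mem_dogIdx vs (k + 1) e he).1; omega, ih (k + 1)⟩

lemma merge_catIdx_dogIdx (vs : List String) (k : Int) :
    pvMerge (catIdx k vs) (dogIdx k vs) = vs.map (fun v => v == "C") := by
  induction vs generalizing k with
  | nil => simp [catIdx, dogIdx, pvMerge]
  | cons v vs ih =>
    simp only [catIdx, dogIdx, List.map_cons]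
    by_cases hv : (v == "C") = true
    · rw [if_pos hv, if_pos hv]
      rw [pvMerge_cons_left k (catIdx (k + 1) vs) (dogIdx (k + 1) vs)
        (fun e he => by have := (mem_dogIdx vs (k + 1) e he).1; omega)]
      rw [ih (k + 1)]
      simp [hv]
    · rw [if_neg hv, if_neg hv]
      rw [pvMerge_cons_right (catIdx (k + 1) vs) k (dogIdx (k + 1) vs)
        (fun e he => by have := (mem_catIdx vs (k + 1) e he).1; omega)]
      rw [ih (k + 1)]
      simp only [Bool.not_eq_true] at hv
      simp [hv]

lemma build_spec (vs : List String) (k : Int) (a b : List Int) :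
    (PySem.List.enumerate vs k).foldl
      (fun (q : List Int × List Int) iv =>
        if iv.2 == "C" then (q.1 ++ [iv.1], q.2) else (q.1, q.2 ++ [iv.1]))
      (a, b) = (a ++ catIdx k vs, b ++ dogIdx k vs) := by
  induction vs generalizing k a b with
  | nil => simp [catIdx, dogIdx, PySem.List.enumerate_nil]
  | cons v vs ih =>
    rw [PySem.List.enumerate_cons, List.foldl_cons]
    by_cases hv : (v == "C") = true
    · rw [if_pos hv]
      rw [ih (k + 1) (a ++ [k]) b]
      simp [catIdx, dogIdx, hv]
    · rw [if_neg hv]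
      rw [ih (k + 1) a (b ++ [k])]
      simp [catIdx, dogIdx, hv]

lemma goA_eq_goB (N : Nat) : ∀ (catQ dogQ : List Int) (n : Int),
    catQ.length + dogQ.length ≤ N →
    catQ.Pairwise (· < ·) → dogQ.Pairwise (· < ·) →
    (∀ x ∈ catQ ++ dogQ, ∀ y ∈ catQ ++ dogQ, x < y + n) →
    pvGoA n catQ dogQ = pvGoB (pvMerge catQ dogQ) := by
  induction N with
  | zero =>
    intro catQ dogQ n hlen _ _ _
    have h1 : catQ = [] := by cases catQ; rfl; simp at hlen
    have h2 : dogQ = [] := by cases dogQ; rfl; subst h1; simp at hlen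
    subst h1; subst h2
    simp [pvGoA, pvMerge, pvGoB]
  | succ N ih =>
    intro catQ dogQ n hlen hc hd hw
    cases catQ with
    | nil =>
      rw [show pvGoA n [] dogQ = "Dog Lovers" from by simp [pvGoA]]
      rw [pvMerge_nil_left]
      simp [pvGoB]
    | cons c cs =>
      cases dogQ with
      | nil =>
        rw [show pvGoA n (c :: cs) [] = "Cat Lovers" from by simp [pvGoA]]
        rw [pvMerge_nil_right]
        simp [pvGoB]
      | cons d ds =>
        have hn : (0:Int) < n := by have := hw c (by simp) c (by simp); omega
        have hcm : ∀ e ∈ cs, c < e := (List.pairwise_cons.mp hc).1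
        have hdm : ∀ e ∈ ds, d < e := (List.pairwise_cons.mp hd).1
        have hcp : cs.Pairwise (· < ·) := (List.pairwise_cons.mp hc).2
        have hdp : ds.Pairwise (· < ·) := (List.pairwise_cons.mp hd).2
        by_cases hlt : c < d
        · rw [show pvGoA n (c :: cs) (d :: ds) = pvGoA n (cs ++ [c + n]) ds from by
            rw [pvGoA.eq_def]; simp [hlt]]
          rw [show pvMerge (c :: cs) (d :: ds) = true :: pvMerge cs (d :: ds) from by
            simp [pvMerge, hlt]]
          have hT : true ∈ true :: pvMerge cs (d :: ds) := by simp
          have hF : false ∈ true :: pvMerge cs (d :: ds) := by simp [mem_false_pvMerge]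
          rw [show pvGoB (true :: pvMerge cs (d :: ds))
              = pvGoB (((pvMerge cs (d :: ds)).erase false) ++ [true]) from by
            rw [pvGoB.eq_def]; rw [dif_pos hT, dif_pos hF]; rfl]
          rw [erase_false_pvMerge cs d ds hdm]
          rw [← append_left_pvMerge cs ds (c + n)
              (fun e he => hw e (by simp [he]) c (by simp))
              (fun e he => hw e (by simp [he]) c (by simp))]
          apply ih (cs ++ [c + n]) ds n
          · simp at hlen ⊢; omega
          · rw [List.pairwise_append]
            refine ⟨hcp, by simp, ?_⟩
            intro a ha b hb
            simp at hb; subst hb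
            have := hw a (by simp [ha]) c (by simp)
            omega
          · exact hdp
          · intro x hx y hy
            simp only [List.mem_append, List.mem_cons] at hx hy
            have hx' : x ∈ cs ∨ x = c + n ∨ x ∈ ds := by tauto
            have hy' : y ∈ cs ∨ y = c + n ∨ y ∈ ds := by tauto
            rcases hx' with hx1 | hx1 | hx1 <;> rcases hy' with hy1 | hy1 | hy1
            · exact hw x (by simp [hx1]) y (by simp [hy1])
            · subst hy1; have := hw x (by simp [hx1]) c (by simp); omega
            · exact hw x (by simp [hx1]) y (by simp [hy1])
            · subst hx1; have := hcm y hy1; omega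
            · subst hx1; omega
            · subst hx1; have := lt_trans hlt (hdm y hy1); omega
            · exact hw x (by simp [hx1]) y (by simp [hy1])
            · subst hy1; have := hw x (by simp [hx1]) c (by simp); omega
            · exact hw x (by simp [hx1]) y (by simp [hy1])
        · rw [show pvGoA n (c :: cs) (d :: ds) = pvGoA n cs (ds ++ [d + n]) from by
            rw [pvGoA.eq_def]; simp [hlt]]
          rw [show pvMerge (c :: cs) (d :: ds) = false :: pvMerge (c :: cs) ds from by
            simp [pvMerge, hlt]]
          have hT : true ∈ false :: pvMerge (c :: cs) ds := by simp [mem_true_pvMerge]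
          have hF : false ∈ false :: pvMerge (c :: cs) ds := by simp
          rw [show pvGoB (false :: pvMerge (c :: cs) ds)
              = pvGoB (((pvMerge (c :: cs) ds).erase true) ++ [false]) from by
            rw [pvGoB.eq_def]; rw [dif_pos hT, dif_pos hF]; rfl]
          rw [erase_true_pvMerge c cs ds hcm]
          rw [← append_right_pvMerge cs ds (d + n)
              (fun e he => hw e (by simp [he]) d (by simp))
              (fun e he => hw e (by simp [he]) d (by simp))]
          apply ih cs (ds ++ [d + n]) n
          · simp at hlen ⊢; omega
          · exact hcp
          · rw [List.pairwise_append]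
            refine ⟨hdp, by simp, ?_⟩
            intro a ha b hb
            simp at hb; subst hb
            have := hw a (by simp [ha]) d (by simp)
            omega
          · intro x hx y hy
            simp only [List.mem_append, List.mem_cons] at hx hy
            have hx' : x ∈ cs ∨ x = d + n ∨ x ∈ ds := by tauto
            have hy' : y ∈ cs ∨ y = d + n ∨ y ∈ ds := by tauto
            rcases hx' with hx1 | hx1 | hx1 <;> rcases hy' with hy1 | hy1 | hy1
            · exact hw x (by simp [hx1]) y (by simp [hy1])
            · subst hy1; have := hw x (by simp [hx1]) d (by simp); omega
            · exact hw x (by simp [hx1]) y (by simp [hy1])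
            · subst hx1; have h1 := hcm y hy1; omega
            · subst hx1; omega
            · subst hx1; have := hdm y hy1; omega
            · exact hw x (by simp [hx1]) y (by simp [hy1])
            · subst hy1; have := hw x (by simp [hx1]) d (by simp); omega
            · exact hw x (by simp [hx1]) y (by simp [hy1])

-- ===== VERDICT (by name: the statement is the Claim_ definition above) =====
theorem predict_adoption_victory_spec : Claim_equal_predict_adoption_victory := by
  intro votes _
  unfold Spec_predict_adoption_victory predict_adoption_victory predict_adoption_victory_alt
  simp only [build_spec]
  simp only [List.nil_append]
  rw [goA_eq_goB ((catIdx 0 votes).length + (dogIdx 0 votes).length) _ _ _ (le_refl _) (sorted_catIdx votes 0) (sorted_dogIdx votes 0)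
      ?_ , merge_catIdx_dogIdx]
  intro x hx y hy
  simp only [List.mem_append] at hx hy
  have hx' : 0 ≤ x ∧ x < (0:Int) + votes.length := by
    rcases hx with h | h
    · exact mem_catIdx votes 0 x h
    · exact mem_dogIdx votes 0 x h
  have hy' : 0 ≤ y ∧ y < (0:Int) + votes.length := by
    rcases hy with h | h
    · exact mem_catIdx votes 0 y h
    · exact mem_dogIdx votes 0 y h
  omega
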